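-- pv_equiv track=rewrite | github.com/ansible/ansible | lib/ansible/modules/packaging/os/zypper_repository.py | _repo_changes
-- ===== SOURCE A (Python) =====
-- def _repo_changes(realrepo, repocmp):
--     "Check whether the 2 given repos have different settings."
--     for k in repocmp:
--         if repocmp[k] and k not in realrepo:
--             return True
--
--     for k, v in realrepo.items():
--         if k in repocmp and repocmp[k]:
--             valold = str(repocmp[k] or "")
--             valnew = v or ""
--             if k == "url":
--                 valold, valnew = valold.rstrip("/"), valnew.rstrip("/")
--             if valold != valnew:
--                 return True
--     return False
-- ===== SOURCE B (Python) =====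
-- def _repo_changes(realrepo, repocmp):
--     "Check whether the 2 given repos have different settings."
--     for k, val in repocmp.items():
--         if not val:
--             continue
--         if k not in realrepo:
--             return True
--         valold, valnew = str(val), realrepo[k] or ""
--         if k == "url":
--             valold, valnew = valold.rstrip("/"), valnew.rstrip("/")
--         if valold != valnew:
--             return True
--     return False
-- ===== Notes on version B (the rewrite author's own statement) =====
-- stated objective: simpler
-- what changed: Replaces A's two sequential scans (one over repocmp keys for missing keys, one over realrepo items for value mismatches) by a single pass over repocmp.items() that decides absence and value difference per key in one traversal; Pre_ only requires the key lists to be duplicate-free, which every Python dict argument satisfies by construction.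
import Mathlib
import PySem

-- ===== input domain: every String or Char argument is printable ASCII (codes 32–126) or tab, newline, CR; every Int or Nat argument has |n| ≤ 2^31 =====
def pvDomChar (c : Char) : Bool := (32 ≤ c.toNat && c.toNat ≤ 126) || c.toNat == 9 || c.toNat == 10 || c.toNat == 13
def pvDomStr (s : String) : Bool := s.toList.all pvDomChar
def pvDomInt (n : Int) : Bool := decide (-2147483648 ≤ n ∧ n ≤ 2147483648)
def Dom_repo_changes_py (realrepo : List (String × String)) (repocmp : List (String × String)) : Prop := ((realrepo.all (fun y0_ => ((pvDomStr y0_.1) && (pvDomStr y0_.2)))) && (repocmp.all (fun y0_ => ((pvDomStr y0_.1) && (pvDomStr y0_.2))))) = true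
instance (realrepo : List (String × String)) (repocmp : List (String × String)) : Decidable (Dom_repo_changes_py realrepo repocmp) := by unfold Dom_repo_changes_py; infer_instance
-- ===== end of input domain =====

-- B collapses A's two sequential scans into a single pass over repocmp; equivalence of the return
-- values is proved for association lists with duplicate-free keys (every Python dict satisfies this).


-- ===== PORT A =====
-- shared helper: s.rstrip("/") — drop trailing '/' characters (exact: rstrip with an explicit char set)
def rstripSlash (s : String) : String :=
  String.ofList ((s.toList.reverse.dropWhile (fun c => c == '/')).reverse)

-- shared helper: the value comparison both Pythons perform verbatim
-- (valold/valnew, with rstrip("/") applied to both iff k == "url"; result = valold != valnew)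
def cmpVals (k valold valnew : String) : Bool :=
  let p := if k = "url" then (rstripSlash valold, rstripSlash valnew) else (valold, valnew)
  decide (p.1 ≠ p.2)

-- first loop of A: 'for k in repocmp: if repocmp[k] and k not in realrepo: return True'
def pyAMissing (realrepo repocmp : List (String × String)) : List String → Bool
  | [] => false
  | k :: ks =>
    if (repocmp.lookup k).getD "" ≠ "" ∧ (realrepo.lookup k).isNone then true
    else pyAMissing realrepo repocmp ks

-- second loop of A: 'for k, v in realrepo.items(): …'
-- (values are strings, so str(repocmp[k] or "") with repocmp[k] truthy is repocmp[k], and 'v or ""' is v)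
def pyACompare (repocmp : List (String × String)) : List (String × String) → Bool
  | [] => false
  | (k, v) :: rest =>
    if (repocmp.lookup k).isSome ∧ (repocmp.lookup k).getD "" ≠ "" then
      if cmpVals k ((repocmp.lookup k).getD "") v then true
      else pyACompare repocmp rest
    else pyACompare repocmp rest

def repo_changes_py (realrepo : List (String × String)) (repocmp : List (String × String)) : Bool :=
  if pyAMissing realrepo repocmp (repocmp.map Prod.fst) then true
  else pyACompare repocmp realrepo

-- ===== PORT B =====
-- single pass over repocmp.items()
def pyBScan (realrepo : List (String × String)) : List (String × String) → Bool
  | [] => false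
  | (k, val) :: rest =>
    if val = "" then pyBScan realrepo rest
    else
      match realrepo.lookup k with
      | none => true
      | some v => if cmpVals k val v then true else pyBScan realrepo rest

def repo_changes_py_alt (realrepo : List (String × String)) (repocmp : List (String × String)) : Bool :=
  pyBScan realrepo repocmp

-- ===== PRECONDITION & SPEC =====
-- Pre_ requires both association lists to have pairwise-distinct keys: every Python dict argument
-- satisfies this by construction (a list with duplicate keys represents no dict), so nothing A
-- accepts is excluded; on duplicate-key lists first-match lookup makes either behaviour accidental.
def Pre_repo_changes_py (realrepo : List (String × String)) (repocmp : List (String × String)) : Prop :=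
  (realrepo.map Prod.fst).Nodup ∧ (repocmp.map Prod.fst).Nodup
instance (realrepo : List (String × String)) (repocmp : List (String × String)) : Decidable (Pre_repo_changes_py realrepo repocmp) := by unfold Pre_repo_changes_py; infer_instance

def pvWitness_repo_changes_py : (List (String × String)) × (List (String × String)) :=
  ([("url", "http://a/"), ("name", "r")], [("url", "http://a"), ("enabled", "1")])

def Spec_repo_changes_py (realrepo : List (String × String)) (repocmp : List (String × String)) (out : Bool) : Prop := out = repo_changes_py_alt realrepo repocmp
instance (realrepo : List (String × String)) (repocmp : List (String × String)) (out : Bool) : Decidable (Spec_repo_changes_py realrepo repocmp out) := by unfold Spec_repo_changes_py; infer_instance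

-- ===== CLAIM (what is proved, stated in full; the proofs are below) =====
def Claim_equal_repo_changes_py : Prop := ∀ (realrepo : List (String × String)) (repocmp : List (String × String)), Dom_repo_changes_py realrepo repocmp → Pre_repo_changes_py realrepo repocmp → Spec_repo_changes_py realrepo repocmp (repo_changes_py realrepo repocmp)

-- ===== LEMMAS AND PROOFS =====

-- association-list lookup facts (first match)
theorem lookup_mem {α : Type} (l : List (String × α)) (k : String) (v : α)
    (h : l.lookup k = some v) : (k, v) ∈ l := by
  induction l with
  | nil => simp [List.lookup] at h
  | cons p rest ih =>
    obtain ⟨k1, v1⟩ := p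
    rw [List.lookup] at h
    by_cases hk : k == k1
    · simp only [hk, Option.some.injEq] at h
      exact List.mem_cons.mpr (Or.inl (by rw [beq_iff_eq.mp hk, h]))
    · simp only [hk] at h
      exact List.mem_cons_of_mem _ (ih h)

theorem lookup_of_mem_nodup {α : Type} (l : List (String × α)) (k : String) (v : α)
    (hn : (l.map Prod.fst).Nodup) (h : (k, v) ∈ l) : l.lookup k = some v := by
  induction l with
  | nil => simp at h
  | cons p rest ih =>
    simp only [List.map_cons, List.nodup_cons] at hn
    rcases List.mem_cons.mp h with h1 | h1
    · rw [← h1, List.lookup]; simp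
    · rw [List.lookup]
      have hne : ¬ (k == p.1) := by
        intro hk
        exact hn.1 (beq_iff_eq.mp hk ▸ (List.mem_map.mpr ⟨(k, v), h1, rfl⟩))
      simp [hne]
      exact ih hn.2 h1

-- characterizations of the three loops as existentials
theorem pyAMissing_iff (realrepo repocmp : List (String × String)) (ks : List String) :
    pyAMissing realrepo repocmp ks = true ↔
      ∃ k ∈ ks, (repocmp.lookup k).getD "" ≠ "" ∧ realrepo.lookup k = none := by
  induction ks with
  | nil => simp [pyAMissing]
  | cons k ks ih =>
    rw [pyAMissing]
    by_cases h : (repocmp.lookup k).getD "" ≠ "" ∧ (realrepo.lookup k).isNone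
    · rw [if_pos h]
      exact iff_of_true rfl ⟨k, by simp, h.1, Option.isNone_iff_eq_none.mp h.2⟩
    · simp only [if_neg h, ih]
      constructor
      · rintro ⟨k', hk', hp⟩; exact ⟨k', List.mem_cons_of_mem _ hk', hp⟩
      · rintro ⟨k', hk', hp⟩
        rcases List.mem_cons.mp hk' with rfl | hm
        · exact absurd ⟨hp.1, Option.isNone_iff_eq_none.mpr hp.2⟩ h
        · exact ⟨k', hm, hp⟩

theorem pyACompare_iff (repocmp rs : List (String × String)) :
    pyACompare repocmp rs = true ↔
      ∃ p ∈ rs, ∃ w, repocmp.lookup p.1 = some w ∧ w ≠ "" ∧ cmpVals p.1 w p.2 = true := by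
  induction rs with
  | nil => simp [pyACompare]
  | cons p rest ih =>
    obtain ⟨k, v⟩ := p
    rw [pyACompare]
    by_cases h : (repocmp.lookup k).isSome ∧ (repocmp.lookup k).getD "" ≠ ""
    · obtain ⟨w, hw⟩ := Option.isSome_iff_exists.mp h.1
      have hwne : w ≠ "" := by have := h.2; rwa [hw, Option.getD_some] at this
      rw [if_pos h, hw, Option.getD_some]
      by_cases hc : cmpVals k w v = true
      · rw [if_pos hc]
        exact iff_of_true rfl ⟨(k, v), by simp, w, hw, hwne, hc⟩
      · rw [if_neg hc, ih]
        constructor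
        · rintro ⟨q, hq, hr⟩; exact ⟨q, List.mem_cons_of_mem _ hq, hr⟩
        · rintro ⟨q, hq, w', hw', hr⟩
          rcases List.mem_cons.mp hq with rfl | hm
          · simp only at hw'
            rw [hw] at hw'; injection hw' with hww; subst hww
            exact absurd hr.2 hc
          · exact ⟨q, hm, w', hw', hr⟩
    · simp only [if_neg h, ih]
      constructor
      · rintro ⟨q, hq, hr⟩; exact ⟨q, List.mem_cons_of_mem _ hq, hr⟩
      · rintro ⟨q, hq, w', hw', hne, hr⟩
        rcases List.mem_cons.mp hq with rfl | hm
        · exact absurd ⟨Option.isSome_iff_exists.mpr ⟨w', hw'⟩, by simp [hw', hne]⟩ h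
        · exact ⟨q, hm, w', hw', hne, hr⟩

theorem pyBScan_iff (realrepo cs : List (String × String)) :
    pyBScan realrepo cs = true ↔
      ∃ p ∈ cs, p.2 ≠ "" ∧ (realrepo.lookup p.1 = none ∨
        ∃ v, realrepo.lookup p.1 = some v ∧ cmpVals p.1 p.2 v = true) := by
  induction cs with
  | nil => simp [pyBScan]
  | cons p rest ih =>
    obtain ⟨k, val⟩ := p
    rw [pyBScan]
    by_cases hv : val = ""
    · simp only [if_pos hv, ih]
      constructor
      · rintro ⟨q, hq, hr⟩; exact ⟨q, List.mem_cons_of_mem _ hq, hr⟩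
      · rintro ⟨q, hq, hne, hr⟩
        rcases List.mem_cons.mp hq with rfl | hm
        · exact absurd hv hne
        · exact ⟨q, hm, hne, hr⟩
    · simp only [if_neg hv]
      cases hl : realrepo.lookup k with
      | none => exact iff_of_true rfl ⟨(k, val), by simp, hv, Or.inl hl⟩
      | some v =>
        show (if cmpVals k val v = true then true else pyBScan realrepo rest) = true ↔ _
        by_cases hc : cmpVals k val v = true
        · rw [if_pos hc]
          exact iff_of_true rfl ⟨(k, val), by simp, hv, Or.inr ⟨v, hl, hc⟩⟩
        · rw [if_neg hc, ih]
          constructor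
          · rintro ⟨q, hq, hr⟩; exact ⟨q, List.mem_cons_of_mem _ hq, hr⟩
          · rintro ⟨q, hq, hne, hr⟩
            rcases List.mem_cons.mp hq with rfl | hm
            · rcases hr with h0 | ⟨v', hv', hc'⟩
              · simp only at h0; rw [hl] at h0; exact absurd h0 (by simp)
              · simp only at hv' hc'
                rw [hl] at hv'; injection hv' with hvv; subst hvv
                exact absurd hc' hc
            · exact ⟨q, hm, hne, hr⟩

-- ===== VERDICT (by name: the statement is the Claim_ definition above) =====
theorem repo_changes_py_spec : Claim_equal_repo_changes_py := by
  intro realrepo repocmp _ hpre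
  obtain ⟨hr, hc⟩ := hpre
  unfold Spec_repo_changes_py repo_changes_py repo_changes_py_alt
  have hA : (if pyAMissing realrepo repocmp (repocmp.map Prod.fst) then true
      else pyACompare repocmp realrepo) = true ↔
      pyAMissing realrepo repocmp (repocmp.map Prod.fst) = true ∨
      pyACompare repocmp realrepo = true := by
    by_cases h : pyAMissing realrepo repocmp (repocmp.map Prod.fst) = true <;> simp [h]
  have key : (if pyAMissing realrepo repocmp (repocmp.map Prod.fst) then true
      else pyACompare repocmp realrepo) = true ↔ pyBScan realrepo repocmp = true := by
    rw [hA, pyAMissing_iff, pyACompare_iff, pyBScan_iff]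
    constructor
    · rintro (⟨k, hk, hne, hnone⟩ | ⟨⟨k, v⟩, hmem, w, hw, hwne, hcmp⟩)
      · obtain ⟨⟨k', val⟩, hpm, rfl⟩ := List.mem_map.mp hk
        have hlook : repocmp.lookup k' = some val := lookup_of_mem_nodup _ _ _ hc hpm
        rw [hlook, Option.getD_some] at hne
        exact ⟨(k', val), hpm, hne, Or.inl hnone⟩
      · have hcm : (k, w) ∈ repocmp := lookup_mem _ _ _ hw
        have hrl : realrepo.lookup k = some v := lookup_of_mem_nodup _ _ _ hr hmem
        exact ⟨(k, w), hcm, hwne, Or.inr ⟨v, hrl, hcmp⟩⟩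
    · rintro ⟨⟨k, val⟩, hmem, hvne, hrest⟩
      have hlook : repocmp.lookup k = some val := lookup_of_mem_nodup _ _ _ hc hmem
      rcases hrest with hnone | ⟨v, hv, hcmp⟩
      · exact Or.inl ⟨k, List.mem_map.mpr ⟨(k, val), hmem, rfl⟩,
          by rw [hlook, Option.getD_some]; exact hvne, hnone⟩
      · exact Or.inr ⟨(k, v), lookup_mem _ _ _ hv, val, hlook, hvne, hcmp⟩
  by_cases hb : pyBScan realrepo repocmp = true
  · rw [hb, key.mpr hb]
  · have := (not_iff_not.mpr key).mpr hb
    simp only [Bool.not_eq_true] at this hb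
    rw [this, hb]
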